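-- pv_equiv track=rewrite | github.com/priyaranjankumar/code_analyser | visualization/report_generator.py | _get_complexity_distribution
-- ===== SOURCE A (Python) =====
-- from typing import Dict, List, Any, Optional
--
-- def _get_complexity_distribution(programs_data: List[Dict[str, Any]]) -> List[int]:
--     """Get complexity distribution for chart"""
--     distribution = [0, 0, 0, 0]  # Low, Medium, High, Very High
--
--     for program in programs_data:
--         ast_data = program.get('ast', {})
--         statements = ast_data.get('statements', [])
--
--         # Calculate complexity based on control flow statements
--         complexity = 1
--         for stmt in statements:
--             stmt_type = stmt.get('type', '')
--             if stmt_type in ['IF', 'ELSE', 'END-IF', 'PERFORM', 'CALL', 'WHILE', 'UNTIL']: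
--                 complexity += 1
--
--         # Categorize complexity
--         if complexity <= 3:
--             distribution[0] += 1  # Low
--         elif complexity <= 8:
--             distribution[1] += 1  # Medium
--         elif complexity <= 15:
--             distribution[2] += 1  # High
--         else:
--             distribution[3] += 1  # Very High
--
--     return distribution
-- ===== SOURCE B (Python) =====
-- from bisect import bisect_right
-- from collections import Counter
--
-- _CONTROL_FLOW = ('IF', 'ELSE', 'END-IF', 'PERFORM', 'CALL', 'WHILE', 'UNTIL')
--
--
-- def _get_complexity_distribution(programs_data):
--     """Get complexity distribution for chart"""
--     # Score each program by tallying its statement types once (Counter) and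
--     # summing the tallies of the seven control-flow tags; then sort all the
--     # scores and read the four bucket sizes off as differences of
--     # bisect_right positions at the bucket boundaries 3, 8, 15.
--     complexities = sorted(
--         1 + sum(Counter(stmt.get('type', '')
--                         for stmt in program.get('ast', {}).get('statements', []))[t]
--                 for t in _CONTROL_FLOW)
--         for program in programs_data)
--     cuts = [bisect_right(complexities, bound) for bound in (3, 8, 15)]
--     return [cuts[0], cuts[1] - cuts[0], cuts[2] - cuts[1],
--             len(complexities) - cuts[2]]
-- ===== Notes on version B (the rewrite author's own statement) =====
-- stated objective: alternative
-- what changed: B scores each program by summing per-tag tallies from a Counter of its statement types (instead of testing each statement's membership), then sorts all scores and reads the four bucket sizes off as differences of bisect_right positions at the boundaries 3/8/15, instead of A's per-program if/elif cascade incrementing a mutable 4-slot accumulator.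
import Mathlib
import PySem

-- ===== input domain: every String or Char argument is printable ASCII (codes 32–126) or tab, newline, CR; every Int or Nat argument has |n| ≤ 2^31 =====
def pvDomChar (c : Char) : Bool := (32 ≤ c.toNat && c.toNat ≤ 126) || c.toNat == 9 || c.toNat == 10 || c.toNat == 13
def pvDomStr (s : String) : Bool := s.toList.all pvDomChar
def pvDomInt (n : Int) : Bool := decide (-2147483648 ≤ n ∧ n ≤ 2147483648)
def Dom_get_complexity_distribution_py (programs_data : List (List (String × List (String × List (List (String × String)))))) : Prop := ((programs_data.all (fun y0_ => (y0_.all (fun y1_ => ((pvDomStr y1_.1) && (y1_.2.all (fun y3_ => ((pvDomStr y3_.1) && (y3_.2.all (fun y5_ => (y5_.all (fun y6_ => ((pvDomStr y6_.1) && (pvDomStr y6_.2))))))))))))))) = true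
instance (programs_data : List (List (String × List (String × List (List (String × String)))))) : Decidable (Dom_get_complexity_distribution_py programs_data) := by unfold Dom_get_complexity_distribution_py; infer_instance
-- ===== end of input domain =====

-- B replaces A's if/elif cascade over a mutable 4-slot accumulator by a sort of the per-program
-- scores followed by bisect_right at the bucket boundaries, and counts each program's control-flow
-- statements via a Counter of its statement types summed over the seven tags (alternative
-- decomposition; same result, similar cost).

-- ===== PORT A =====
def get_complexity_distribution_py (programs_data : List (List (String × List (String × List (List (String × String)))))) : List Int :=
  programs_data.foldl (fun distribution program =>
    let ast_data := PySem.Dict.getD ⟨program⟩ "ast" []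
    let statements := PySem.Dict.getD ⟨ast_data⟩ "statements" []
    let complexity := statements.foldl (fun complexity stmt =>
      let stmt_type := PySem.Dict.getD ⟨stmt⟩ "type" ""
      if ["IF", "ELSE", "END-IF", "PERFORM", "CALL", "WHILE", "UNTIL"].contains stmt_type
      then complexity + 1 else complexity) (1 : Int)
    if complexity ≤ 3 then
      PySem.List.pySetD distribution 0 (PySem.List.pyGetD distribution 0 0 + 1)
    else if complexity ≤ 8 then
      PySem.List.pySetD distribution 1 (PySem.List.pyGetD distribution 1 0 + 1)
    else if complexity ≤ 15 then
      PySem.List.pySetD distribution 2 (PySem.List.pyGetD distribution 2 0 + 1)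
    else
      PySem.List.pySetD distribution 3 (PySem.List.pyGetD distribution 3 0 + 1))
    [0, 0, 0, 0]

-- ===== PORT B =====
def pvControlFlow : List String := ["IF", "ELSE", "END-IF", "PERFORM", "CALL", "WHILE", "UNTIL"]

-- the generator expression inside Source B's sorted(...): one program's complexity score
def pvScore (program : List (String × List (String × List (List (String × String))))) : Int :=
  let ctr := PySem.Dict.counter
    ((PySem.Dict.getD ⟨PySem.Dict.getD ⟨program⟩ "ast" []⟩ "statements" []).map
      (fun stmt => PySem.Dict.getD ⟨stmt⟩ "type" ""))
  1 + (pvControlFlow.map (fun t => ctr.getD t 0)).sum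

def get_complexity_distribution_py_alt (programs_data : List (List (String × List (String × List (List (String × String)))))) : List Int :=
  let complexities := PySem.List.sorted (programs_data.map pvScore) (fun x => x) false
  let cuts := ([3, 8, 15] : List Int).map (fun bound => (PySem.List.bisectRight complexities bound : Int))
  [cuts.getD 0 0, cuts.getD 1 0 - cuts.getD 0 0, cuts.getD 2 0 - cuts.getD 1 0,
   (complexities.length : Int) - cuts.getD 2 0]

-- ===== PRECONDITION & SPEC =====
def Spec_get_complexity_distribution_py (programs_data : List (List (String × List (String × List (List (String × String)))))) (out : List Int) : Prop := out = get_complexity_distribution_py_alt programs_data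
instance (programs_data : List (List (String × List (String × List (List (String × String)))))) (out : List Int) : Decidable (Spec_get_complexity_distribution_py programs_data out) := by unfold Spec_get_complexity_distribution_py; infer_instance

-- ===== CLAIM (what is proved, stated in full; the proofs are below) =====
def Claim_equal_get_complexity_distribution_py : Prop := ∀ (programs_data : List (List (String × List (String × List (List (String × String)))))), Dom_get_complexity_distribution_py programs_data → Spec_get_complexity_distribution_py programs_data (get_complexity_distribution_py programs_data)

-- ===== LEMMAS AND PROOFS =====

-- summing Counter tallies over a duplicate-free tag list counts the members of that list
theorem pvCountP_cons_tag (t : String) (rest : List String) (ht : t ∉ rest)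
    (types : List String) :
    types.countP (fun s => (t :: rest).contains s) =
      types.count t + types.countP (fun s => rest.contains s) := by
  induction types with
  | nil => simp
  | cons x xs ih =>
    simp only [List.countP_cons, List.count_cons, ih]
    by_cases hx : x = t
    · subst hx
      have : x ∉ rest := ht
      simp [this]; omega
    · simp [hx]
      by_cases hr : x ∈ rest <;> simp [hr] <;> omega

theorem pvSum_count_eq_countP (tags : List String) (h : tags.Nodup) (types : List String) :
    (tags.map (fun t => (types.count t : Int))).sum =
      (types.countP (fun s => tags.contains s) : Int) := by
  induction tags with
  | nil => simp
  | cons t rest ih =>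
    simp only [List.nodup_cons] at h
    rw [List.map_cons, List.sum_cons, ih h.2,
      pvCountP_cons_tag t rest h.1 types]
    push_cast
    ring

-- B's score of a program equals A's inner complexity fold
theorem pvScore_eq (program : List (String × List (String × List (List (String × String))))) :
    pvScore program =
      (PySem.Dict.getD ⟨PySem.Dict.getD ⟨program⟩ "ast" []⟩ "statements" []).foldl
        (fun complexity stmt =>
          if ["IF", "ELSE", "END-IF", "PERFORM", "CALL", "WHILE", "UNTIL"].contains
               (PySem.Dict.getD ⟨stmt⟩ "type" "") then complexity + 1 else complexity) (1 : Int) := by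
  unfold pvScore
  rw [PySem.List.foldl_count_if]
  simp only [PySem.Dict.getD_counter]
  rw [pvSum_count_eq_countP pvControlFlow (by decide)]
  rw [List.countP_map]
  simp [pvControlFlow, Function.comp_def]

-- bisect_right on a ≤-sorted Int list counts the elements ≤ the probe
theorem pvBisectRight_countP (xs : List Int) (hs : xs.Pairwise (· ≤ ·)) (b : Int) :
    PySem.List.bisectRight xs b = xs.countP (fun x => decide (x ≤ b)) := by
  obtain ⟨hk, hlo, hhi⟩ := PySem.List.bisectRight_spec xs b hs
  set k := PySem.List.bisectRight xs b with hkdef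
  have hsplit : xs = xs.take k ++ xs.drop k := (List.take_append_drop k xs).symm
  rw [hsplit, List.countP_append]
  have h1 : (xs.take k).countP (fun x => decide (x ≤ b)) = k := by
    have hlen : (xs.take k).length = k := by simp [hk]
    rw [List.countP_eq_length.mpr, hlen]
    intro a ha
    obtain ⟨j, hj, rfl⟩ := List.getElem_of_mem ha
    have hjk : j < k := by simpa [hlen] using hj
    have hjx : j < xs.length := lt_of_lt_of_le hjk hk
    have := hlo j hjx hjk
    simp only [List.getElem_take] at *
    simpa using this
  have h2 : (xs.drop k).countP (fun x => decide (x ≤ b)) = 0 := by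
    rw [List.countP_eq_zero]
    intro a ha
    obtain ⟨j, hj, rfl⟩ := List.getElem_of_mem ha
    have hjx : k + j < xs.length := by simpa [Nat.add_comm] using (List.length_drop (l := xs) (i := k) ▸ hj : j < xs.length - k) |> fun h => by omega
    have := hhi (k + j) hjx (Nat.le_add_right k j)
    simp only [List.getElem_drop] at *
    simp
    omega
  omega

-- splitting a ≤-count at an inner boundary
theorem pvCountP_le_split (a b : Int) (hab : a ≤ b) (xs : List Int) :
    xs.countP (fun x => decide (x ≤ b)) =
      xs.countP (fun x => decide (x ≤ a)) +
        xs.countP (fun x => decide (¬ (x ≤ a) ∧ x ≤ b)) := by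
  induction xs with
  | nil => simp
  | cons x t ih =>
    simp only [List.countP_cons, ih]
    by_cases h1 : x ≤ a <;> by_cases h2 : x ≤ b <;> simp [h1, h2] <;> omega

-- one step of A's loop, by the complexity's bucket
theorem pvStepA (d0 d1 d2 d3 : Int)
    (program : List (String × List (String × List (List (String × String))))) :
    (let ast_data := PySem.Dict.getD ⟨program⟩ "ast" []
     let statements := PySem.Dict.getD ⟨ast_data⟩ "statements" []
     let complexity := statements.foldl (fun complexity stmt =>
       let stmt_type := PySem.Dict.getD ⟨stmt⟩ "type" ""
       if ["IF", "ELSE", "END-IF", "PERFORM", "CALL", "WHILE", "UNTIL"].contains stmt_type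
       then complexity + 1 else complexity) (1 : Int)
     if complexity ≤ 3 then
       PySem.List.pySetD [d0, d1, d2, d3] 0 (PySem.List.pyGetD [d0, d1, d2, d3] 0 0 + 1)
     else if complexity ≤ 8 then
       PySem.List.pySetD [d0, d1, d2, d3] 1 (PySem.List.pyGetD [d0, d1, d2, d3] 1 0 + 1)
     else if complexity ≤ 15 then
       PySem.List.pySetD [d0, d1, d2, d3] 2 (PySem.List.pyGetD [d0, d1, d2, d3] 2 0 + 1)
     else
       PySem.List.pySetD [d0, d1, d2, d3] 3 (PySem.List.pyGetD [d0, d1, d2, d3] 3 0 + 1)) =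
    (let c := pvScore program
     [d0 + (if c ≤ 3 then 1 else 0),
      d1 + (if ¬ (c ≤ 3) ∧ c ≤ 8 then 1 else 0),
      d2 + (if ¬ (c ≤ 8) ∧ c ≤ 15 then 1 else 0),
      d3 + (if ¬ (c ≤ 15) then 1 else 0)]) := by
  simp only [pvScore_eq program]
  split_ifs with h1 h2 h3 <;>
    simp [PySem.List.pySetD, PySem.List.pySet?, PySem.List.pyIdx?, PySem.List.pyGetD,
      PySem.List.pyGet?, *] <;> omega

-- A's fold in closed form: bucket counts over the scores
theorem pvFoldA (pd : List (List (String × List (String × List (List (String × String))))))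
    (d0 d1 d2 d3 : Int) :
    pd.foldl (fun distribution program =>
      let ast_data := PySem.Dict.getD ⟨program⟩ "ast" []
      let statements := PySem.Dict.getD ⟨ast_data⟩ "statements" []
      let complexity := statements.foldl (fun complexity stmt =>
        let stmt_type := PySem.Dict.getD ⟨stmt⟩ "type" ""
        if ["IF", "ELSE", "END-IF", "PERFORM", "CALL", "WHILE", "UNTIL"].contains stmt_type
        then complexity + 1 else complexity) (1 : Int)
      if complexity ≤ 3 then
        PySem.List.pySetD distribution 0 (PySem.List.pyGetD distribution 0 0 + 1)
      else if complexity ≤ 8 then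
        PySem.List.pySetD distribution 1 (PySem.List.pyGetD distribution 1 0 + 1)
      else if complexity ≤ 15 then
        PySem.List.pySetD distribution 2 (PySem.List.pyGetD distribution 2 0 + 1)
      else
        PySem.List.pySetD distribution 3 (PySem.List.pyGetD distribution 3 0 + 1))
      [d0, d1, d2, d3] =
    [d0 + ((pd.map pvScore).countP (fun x => decide (x ≤ 3)) : Int),
     d1 + ((pd.map pvScore).countP (fun x => decide (¬ (x ≤ 3) ∧ x ≤ 8)) : Int),
     d2 + ((pd.map pvScore).countP (fun x => decide (¬ (x ≤ 8) ∧ x ≤ 15)) : Int),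
     d3 + ((pd.map pvScore).countP (fun x => decide (¬ (x ≤ 15))) : Int)] := by
  induction pd generalizing d0 d1 d2 d3 with
  | nil => simp
  | cons p rest ih =>
    rw [List.foldl_cons, pvStepA d0 d1 d2 d3 p]
    simp only [List.map_cons, List.countP_cons]
    rw [ih]
    generalize pvScore p = c
    generalize (rest.map pvScore) = cs
    simp only [List.cons.injEq, and_true]
    by_cases h1 : c ≤ 3 <;> by_cases h2 : c ≤ 8 <;> by_cases h3 : c ≤ 15 <;>
      simp only [h1, h2, h3, decide_true, decide_false, not_true, not_false_iff, and_true, and_false, if_true, if_false, decide_not] <;>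
      refine ⟨by push_cast; omega, by push_cast; omega, by push_cast; omega, by push_cast; omega⟩

-- ===== VERDICT (by name: the statement is the Claim_ definition above) =====
theorem get_complexity_distribution_py_spec : Claim_equal_get_complexity_distribution_py := by
  intro pd _
  unfold Spec_get_complexity_distribution_py get_complexity_distribution_py get_complexity_distribution_py_alt
  rw [pvFoldA pd 0 0 0 0]
  set cs := pd.map pvScore with hcs
  have hperm : (PySem.List.sorted cs (fun x => x) false).Perm cs := PySem.List.sorted_perm cs _ _
  have hpw : (PySem.List.sorted cs (fun x => x) false).Pairwise (· ≤ ·) := by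
    simpa using PySem.List.sorted_pairwise cs (fun x => x)
  have hbr : ∀ b : Int, PySem.List.bisectRight (PySem.List.sorted cs (fun x => x) false) b =
      cs.countP (fun x => decide (x ≤ b)) := by
    intro b
    rw [pvBisectRight_countP _ hpw b, hperm.countP_eq]
  have hlen : (PySem.List.sorted cs (fun x => x) false).length = cs.length := hperm.length_eq
  simp only [List.map_cons, List.map_nil, List.getD_cons_zero, List.getD_cons_succ, hbr, hlen]
  have s38 := pvCountP_le_split 3 8 (by norm_num) cs
  have s815 := pvCountP_le_split 8 15 (by norm_num) cs
  have hn : cs.length = cs.countP (fun x => decide (x ≤ 15)) +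
      cs.countP (fun x => decide (¬ (x ≤ 15))) := by
    induction cs with
    | nil => simp
    | cons x t ih => simp only [List.countP_cons, List.length_cons, ih]; by_cases h : x ≤ 15 <;> simp [h] <;> omega
  simp only [List.cons.injEq, and_true]
  refine ⟨by omega, by omega, by omega, by omega⟩
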